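-- pv_equiv track=rewrite | github.com/ranggawaridat/Manajemen-Mahasiswa | algorithms.py | algo_binary_search
-- ===== SOURCE A (Python) =====
-- def algo_binary_search(data, q):
--     sorted_data = sorted(data, key=lambda x: x['nama'].lower())
--     q = q.lower(); low = 0; high = len(sorted_data) - 1; found = -1
--     while low <= high:
--         mid = (low + high) // 2
--         val = sorted_data[mid]['nama'].lower()
--         if val.startswith(q): found = mid; break
--         elif val < q: low = mid + 1
--         else: high = mid - 1
--     if found != -1:
--         l = found
--         while l >= 0 and sorted_data[l]['nama'].lower().startswith(q): l -= 1
--         r = found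
--         while r < len(sorted_data) and sorted_data[r]['nama'].lower().startswith(q): r += 1
--         return sorted_data[l+1 : r]
--     return []
-- ===== SOURCE B (Python) =====
-- def algo_binary_search(data, q):
--     qq = q.lower()
--     sorted_data = sorted(data, key=lambda x: x['nama'].lower())
--     return [x for x in sorted_data if x['nama'].lower().startswith(qq)]
-- ===== Notes on version B (the rewrite author's own statement) =====
-- stated objective: simpler
-- what changed: Replaces the binary search plus bidirectional expansion over the sorted list by a single filter pass over the same sorted list (prefix matches are contiguous in lexicographic order, so the filter returns exactly the expanded slice).
import Mathlib
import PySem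

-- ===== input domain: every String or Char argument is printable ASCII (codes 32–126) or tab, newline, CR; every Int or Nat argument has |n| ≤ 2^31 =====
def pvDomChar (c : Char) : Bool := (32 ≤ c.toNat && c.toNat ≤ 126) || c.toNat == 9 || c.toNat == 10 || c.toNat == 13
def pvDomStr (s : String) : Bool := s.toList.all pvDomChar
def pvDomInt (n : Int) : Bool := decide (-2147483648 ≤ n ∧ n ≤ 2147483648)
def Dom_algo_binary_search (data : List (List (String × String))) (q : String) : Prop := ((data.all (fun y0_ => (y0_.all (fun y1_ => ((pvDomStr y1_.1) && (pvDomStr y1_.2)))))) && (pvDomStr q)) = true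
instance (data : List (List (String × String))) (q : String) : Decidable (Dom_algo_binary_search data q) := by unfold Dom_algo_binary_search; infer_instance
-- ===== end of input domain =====

-- B replaces A's binary search + bidirectional expansion by one filter pass over the
-- identically sorted list (objective: simpler; prefix matches are contiguous when sorted).

-- ===== PORT A =====
-- x['nama'] (dict lookup, first match); total under Pre_ (every dict has the key)
def pvNama (x : List (String × String)) : String := (PySem.Dict.mk x).getD "nama" ""

-- the sort/search key x['nama'].lower()
def pvKey (x : List (String × String)) : String := PySem.Str.lower (pvNama x)

-- the 'while low <= high' binary-search loop; returns 'found' (-1 if the loop falls through)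
def pvBsLoop (s : List (List (String × String))) (qq : String) (low high : Int) : Int :=
  if _h : low ≤ high then
    let mid := PySem.Int.floordiv (low + high) 2
    let val := pvKey (PySem.List.pyGetD s mid [])
    if PySem.Str.startswith val qq then mid
    else if val < qq then pvBsLoop s qq (mid + 1) high
    else pvBsLoop s qq low (mid - 1)
  else -1
termination_by (high + 1 - low).toNat
decreasing_by
  · have h2 := PySem.Int.floordiv_two_mid_bounds _h
    omega
  · have h2 := PySem.Int.floordiv_two_mid_bounds _h
    omega

-- 'while l >= 0 and sorted_data[l]['nama'].lower().startswith(q): l -= 1'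
def pvExpandL (s : List (List (String × String))) (qq : String) (l : Int) : Int :=
  if _h : 0 ≤ l then
    if PySem.Str.startswith (pvKey (PySem.List.pyGetD s l [])) qq then pvExpandL s qq (l - 1)
    else l
  else l
termination_by (l + 1).toNat
decreasing_by omega

-- 'while r < len(sorted_data) and sorted_data[r]['nama'].lower().startswith(q): r += 1'
def pvExpandR (s : List (List (String × String))) (qq : String) (r : Int) : Int :=
  if _h : r < (s.length : Int) then
    if PySem.Str.startswith (pvKey (PySem.List.pyGetD s r [])) qq then pvExpandR s qq (r + 1)
    else r
  else r
termination_by ((s.length : Int) - r).toNat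
decreasing_by omega

def algo_binary_search (data : List (List (String × String))) (q : String) : List (List (String × String)) :=
  let sorted_data := PySem.List.sorted data (fun x => pvKey x) false
  let qq := PySem.Str.lower q
  let found := pvBsLoop sorted_data qq 0 ((sorted_data.length : Int) - 1)
  if found ≠ -1 then
    let l := pvExpandL sorted_data qq found
    let r := pvExpandR sorted_data qq found
    PySem.List.slice sorted_data (some (l + 1)) (some r)
  else []

-- ===== PORT B =====
def algo_binary_search_alt (data : List (List (String × String))) (q : String) : List (List (String × String)) :=
  let qq := PySem.Str.lower q
  let sorted_data := PySem.List.sorted data (fun x => pvKey x) false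
  sorted_data.filter (fun x => PySem.Str.startswith (pvKey x) qq)

-- ===== PRECONDITION & SPEC =====
-- Pre_ excludes exactly the inputs where some record lacks the key 'nama': there the
-- Python A (and B alike) raises KeyError inside the sort key.
def Pre_algo_binary_search (data : List (List (String × String))) (q : String) : Prop :=
  ∀ x ∈ data, x.any (fun p => p.1 == "nama") = true
instance (data : List (List (String × String))) (q : String) : Decidable (Pre_algo_binary_search data q) := by unfold Pre_algo_binary_search; infer_instance

def pvWitness_algo_binary_search : (List (List (String × String))) × String :=
  ([[("nama", "Ali"), ("nim", "1")], [("nama", "budi")]], "a")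

def Spec_algo_binary_search (data : List (List (String × String))) (q : String) (out : List (List (String × String))) : Prop := out = algo_binary_search_alt data q
instance (data : List (List (String × String))) (q : String) (out : List (List (String × String))) : Decidable (Spec_algo_binary_search data q out) := by unfold Spec_algo_binary_search; infer_instance

-- ===== CLAIM (what is proved, stated in full; the proofs are below) =====
def Claim_equal_algo_binary_search : Prop := ∀ (data : List (List (String × String))) (q : String), Dom_algo_binary_search data q → Pre_algo_binary_search data q → Spec_algo_binary_search data q (algo_binary_search data q)

-- ===== LEMMAS AND PROOFS =====

-- a word is never lexicographically smaller than one of its prefixes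
lemma pvLexNotLt (q t : List Char) : ¬ List.Lex (· < ·) (q ++ t) q := by
  induction q with
  | nil => intro h; cases h
  | cons a q ih =>
    intro h
    cases h with
    | cons h => exact ih h
    | rel h => exact lt_irrefl _ h

-- a prefix of v is ≤ v (Python string comparison = code-point lexicographic)
lemma pvPrefixLe {q v : String} (h : q.toList <+: v.toList) : q ≤ v := by
  obtain ⟨t, ht⟩ := h
  refine le_of_not_gt ?_
  rw [String.lt_iff_toList_lt]
  intro hlt
  exact pvLexNotLt q.toList t (by rwa [ht])

-- if q < v at a genuine character difference (q not a prefix of v), every word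
-- starting with q is still < v
lemma pvLexShift {q v w : List Char} (h : List.Lex (· < ·) q v) (hnp : ¬ q <+: v)
    (hw : q <+: w) : List.Lex (· < ·) w v := by
  induction h generalizing w with
  | nil => exact absurd List.nil_prefix hnp
  | @cons a l₁ l₂ h ih =>
    obtain ⟨t, ht⟩ := hw
    cases w with
    | nil => exact absurd ht (by simp)
    | cons b w' =>
      rw [List.cons_append] at ht
      injection ht with h1 h2
      subst h1
      refine List.Lex.cons (ih ?_ ⟨t, h2⟩)
      intro hp
      exact hnp (List.cons_prefix_cons.mpr ⟨rfl, hp⟩)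
  | @rel a b l₁ l₂ hab =>
    obtain ⟨t, ht⟩ := hw
    cases w with
    | nil => exact absurd ht (by simp)
    | cons c w' =>
      rw [List.cons_append] at ht
      injection ht with h1 h2
      subst h1
      exact List.Lex.rel hab

-- a non-match v with qq ≤ v is strictly above every match w
lemma pvBlock {v w qq : String} (hv : PySem.Str.startswith v qq = false) (hq : qq ≤ v)
    (hw : PySem.Str.startswith w qq = true) : w < v := by
  have hv' : ¬ qq.toList <+: v.toList := by
    intro hp
    have h2 := (PySem.Chars.startswith_iff _ _).mpr hp
    simp only [PySem.Str.startswith_eq] at hv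
    rw [hv] at h2
    cases h2
  have hw' : qq.toList <+: w.toList := by
    simpa [PySem.Chars.startswith_iff] using hw
  have hqv : qq < v := by
    rcases lt_or_eq_of_le hq with h | h
    · exact h
    · exact absurd (h ▸ List.prefix_refl _) hv'
  rw [String.lt_iff_toList_lt] at hqv ⊢
  exact pvLexShift hqv hv' hw'

-- key of s[i] read through Python indexing (in range wherever used)
def pvKeyAt (s : List (List (String × String))) (i : Int) : String :=
  pvKey (PySem.List.pyGetD s i [])

-- the match predicate at index i
def pvP (s : List (List (String × String))) (qq : String) (i : Int) : Bool :=
  PySem.Str.startswith (pvKeyAt s i) qq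

lemma pvMono {s : List (List (String × String))}
    (hp : s.Pairwise (fun a b => pvKey a ≤ pvKey b)) {i j : Int}
    (h0 : 0 ≤ i) (hij : i ≤ j) (hj : j < (s.length : Int)) : pvKeyAt s i ≤ pvKeyAt s j := by
  rcases eq_or_lt_of_le hij with rfl | hlt
  · exact le_refl _
  · have hi' : i < (s.length : Int) := lt_trans hlt hj
    rw [pvKeyAt, pvKeyAt, PySem.List.pyGetD_eq_getElem s [] h0 hi',
        PySem.List.pyGetD_eq_getElem s [] (by omega) hj]
    exact (List.pairwise_iff_getElem.mp hp) i.toNat j.toNat (by omega) (by omega) (by omega)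

lemma pvP_match_le {s : List (List (String × String))} {qq : String} {i : Int}
    (h : pvP s qq i = true) : qq ≤ pvKeyAt s i := by
  rw [pvP] at h
  simp only [PySem.Str.startswith_eq] at h
  exact pvPrefixLe ((PySem.Chars.startswith_iff _ _).mp h)

-- contiguity of matches in a key-sorted list
lemma pvContig {s : List (List (String × String))} {qq : String}
    (hp : s.Pairwise (fun a b => pvKey a ≤ pvKey b)) {i j k : Int}
    (h0 : 0 ≤ i) (hij : i ≤ j) (hjk : j ≤ k) (hk : k < (s.length : Int))
    (hi : pvP s qq i = true) (hkm : pvP s qq k = true) : pvP s qq j = true := by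
  by_contra hj
  have hj' : pvP s qq j = false := by revert hj; cases pvP s qq j <;> simp
  have hq : qq ≤ pvKeyAt s j := le_trans (pvP_match_le hi) (pvMono hp h0 hij (by omega))
  have hlt := pvBlock (v := pvKeyAt s j) (w := pvKeyAt s k) hj' hq hkm
  exact absurd (pvMono hp (by omega) hjk hk) (not_le_of_gt hlt)

-- the binary search returns -1 or an index in [low, high] whose key matches
lemma pvBsLoop_found (s : List (List (String × String))) (qq : String) :
    ∀ low high : Int, pvBsLoop s qq low high ≠ -1 →
      low ≤ pvBsLoop s qq low high ∧ pvBsLoop s qq low high ≤ high ∧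
      pvP s qq (pvBsLoop s qq low high) = true := by
  intro low high
  fun_induction pvBsLoop s qq low high with
  | case1 low high h mid val hsw =>
    intro _
    have h2 := PySem.Int.floordiv_two_mid_bounds h
    refine ⟨h2.1, h2.2, ?_⟩
    simpa [pvP, pvKeyAt, val, mid] using hsw
  | case2 low high h mid val hsw hlt ih =>
    intro hne
    have h2 := PySem.Int.floordiv_two_mid_bounds h
    obtain ⟨a, b, c⟩ := ih hne
    exact ⟨by omega, b, c⟩
  | case3 low high h mid val hsw hlt ih =>
    intro hne
    have h2 := PySem.Int.floordiv_two_mid_bounds h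
    obtain ⟨a, b, c⟩ := ih hne
    exact ⟨a, by omega, c⟩
  | case4 low high h =>
    intro hne; exact absurd rfl hne

-- if all matches lie in [low, high] and the search returns -1, there is no match at all
lemma pvBsLoop_none {s : List (List (String × String))} {qq : String}
    (hp : s.Pairwise (fun a b => pvKey a ≤ pvKey b)) :
    ∀ low high : Int, 0 ≤ low → high < (s.length : Int) →
      (∀ i : Int, 0 ≤ i → i < (s.length : Int) → pvP s qq i = true → low ≤ i ∧ i ≤ high) →
      pvBsLoop s qq low high = -1 →
      ∀ i : Int, 0 ≤ i → i < (s.length : Int) → pvP s qq i = false := by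
  intro low high
  fun_induction pvBsLoop s qq low high with
  | case1 low high h mid val hsw =>
    intro hl hh H heq
    have h2 := PySem.Int.floordiv_two_mid_bounds h
    omega
  | case2 low high h mid val hsw hlt ih =>
    intro hl hh H heq
    have h2 := PySem.Int.floordiv_two_mid_bounds h
    refine ih (by omega) hh ?_ heq
    intro i h0 hilen hPi
    have hbd := H i h0 hilen hPi
    refine ⟨?_, hbd.2⟩
    by_contra hle
    have hile : i ≤ mid := by omega
    have hmono := pvMono hp h0 hile (by omega)
    have hq := pvP_match_le hPi
    have : qq ≤ val := le_trans hq hmono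
    exact absurd hlt (not_lt_of_ge this)
  | case3 low high h mid val hsw hlt ih =>
    intro hl hh H heq
    have h2 := PySem.Int.floordiv_two_mid_bounds h
    refine ih hl (by omega) ?_ heq
    intro i h0 hilen hPi
    have hbd := H i h0 hilen hPi
    refine ⟨hbd.1, ?_⟩
    by_contra hle
    have hmile : mid ≤ i := by omega
    have hsw' : PySem.Str.startswith val qq = false := by
      revert hsw; cases PySem.Str.startswith val qq <;> simp
    have hq : qq ≤ val := le_of_not_gt hlt
    have hblk := pvBlock hsw' hq (w := pvKeyAt s i) hPi
    have hmono := pvMono hp (by omega) hmile hilen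
    exact absurd hmono (not_le_of_gt hblk)
  | case4 low high h =>
    intro hl hh H heq i h0 hilen
    cases hx : pvP s qq i
    · rfl
    · have := H i h0 hilen hx
      omega

lemma pvExpandL_spec (s : List (List (String × String))) (qq : String) :
    ∀ l : Int, pvExpandL s qq l ≤ l ∧
      (∀ i : Int, pvExpandL s qq l < i → i ≤ l → pvP s qq i = true) ∧
      (pvExpandL s qq l < 0 ∨ pvP s qq (pvExpandL s qq l) = false) ∧
      (-1 ≤ l → -1 ≤ pvExpandL s qq l) := by
  intro l
  fun_induction pvExpandL s qq l with
  | case1 l h hsw ih =>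
    obtain ⟨a, b, c, d⟩ := ih
    refine ⟨by omega, ?_, c, fun _ => d (by omega)⟩
    intro i h1 h2
    rcases eq_or_lt_of_le h2 with rfl | hlt
    · simpa [pvP, pvKeyAt] using hsw
    · exact b i h1 (by omega)
  | case2 l h hsw =>
    refine ⟨le_refl _, fun i h1 h2 => by omega, ?_, fun _ => by omega⟩
    right
    revert hsw
    simp only [pvP, pvKeyAt]
    cases PySem.Str.startswith (pvKey (PySem.List.pyGetD s l [])) qq <;> simp
  | case3 l h =>
    exact ⟨le_refl _, fun i h1 h2 => by omega, Or.inl (by omega), fun hx => hx⟩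

lemma pvExpandR_spec (s : List (List (String × String))) (qq : String) :
    ∀ r : Int, r ≤ pvExpandR s qq r ∧
      (∀ i : Int, r ≤ i → i < pvExpandR s qq r → pvP s qq i = true) ∧
      ((s.length : Int) ≤ pvExpandR s qq r ∨ pvP s qq (pvExpandR s qq r) = false) ∧
      (r ≤ (s.length : Int) → pvExpandR s qq r ≤ (s.length : Int)) := by
  intro r
  fun_induction pvExpandR s qq r with
  | case1 r h hsw ih =>
    obtain ⟨a, b, c, d⟩ := ih
    refine ⟨by omega, ?_, c, fun _ => d (by omega)⟩
    intro i h1 h2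
    rcases eq_or_lt_of_le h1 with rfl | hlt
    · simpa [pvP, pvKeyAt] using hsw
    · exact b i (by omega) h2
  | case2 r h hsw =>
    refine ⟨le_refl _, fun i h1 h2 => by omega, ?_, fun hx => hx⟩
    right
    revert hsw
    simp only [pvP, pvKeyAt]
    cases PySem.Str.startswith (pvKey (PySem.List.pyGetD s r [])) qq <;> simp
  | case3 r h =>
    exact ⟨le_refl _, fun i h1 h2 => by omega, Or.inl (by omega), fun hx => hx⟩

-- a filter whose matches are exactly the index interval [a, b) is the drop/take slice
lemma pvFilterInterval {α : Type} (P : α → Bool) :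
    ∀ (s : List α) (a b : Nat),
      (∀ (i : Nat) (hi : i < s.length), P s[i] = decide (a ≤ i ∧ i < b)) →
      s.filter P = (s.drop a).take (b - a) := by
  intro s
  induction s with
  | nil => intro a b _; simp
  | cons x t ih =>
    intro a b h
    have h0 := h 0 (by simp)
    simp only [List.getElem_cons_zero] at h0
    match a, b with
    | 0, 0 =>
      have hx : P x = false := by simp at h0; exact h0
      have ht := ih 0 0 (fun i hi => by
        have := h (i+1) (by simpa using Nat.succ_lt_succ hi)
        simpa using this)
      simp [hx, ht]
    | 0, b+1 =>
      have hx : P x = true := by simp at h0; exact h0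
      have ht := ih 0 b (fun i hi => by
        have := h (i+1) (by simpa using Nat.succ_lt_succ hi)
        simp only [List.getElem_cons_succ] at this
        rw [this, decide_eq_decide]
        omega)
      simp [hx, ht]
    | a+1, b =>
      have hx : P x = false := by simp at h0; omega
      have ht := ih a (b-1) (fun i hi => by
        have := h (i+1) (by simpa using Nat.succ_lt_succ hi)
        simp only [List.getElem_cons_succ] at this
        rw [this, decide_eq_decide]
        omega)
      simp only [List.filter_cons, hx, Bool.false_eq_true, if_false]
      rw [ht, List.drop_succ_cons]
      congr 1
      omega

-- the two ports agree on every input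
theorem pvMainEq (data : List (List (String × String))) (q : String) :
    algo_binary_search data q = algo_binary_search_alt data q := by
  unfold algo_binary_search algo_binary_search_alt
  simp only []
  set s := PySem.List.sorted data (fun x => pvKey x) false with hs
  set qq := PySem.Str.lower q with hqq
  have hp : s.Pairwise (fun a b => pvKey a ≤ pvKey b) := PySem.List.sorted_pairwise data _
  by_cases hf : pvBsLoop s qq 0 ((s.length : Int) - 1) = -1
  · rw [if_neg (by simpa using hf)]
    have hnone := pvBsLoop_none hp 0 ((s.length : Int) - 1) (by omega) (by omega)
      (fun i h0 hl _ => ⟨h0, by omega⟩) hf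
    symm
    rw [List.filter_eq_nil_iff]
    intro x hx
    obtain ⟨i, hi, rfl⟩ := List.getElem_of_mem hx
    have hP := hnone (i : Int) (by omega) (by omega)
    rw [pvP, pvKeyAt, PySem.List.pyGetD_eq_getElem s [] (by omega) (by omega)] at hP
    simp only [Int.toNat_natCast] at hP
    simp only [PySem.Str.startswith_eq] at hP
    simp [hP]
  · rw [if_pos (by simpa using hf)]
    obtain ⟨hfl, hfh, hfP⟩ := pvBsLoop_found s qq 0 ((s.length : Int) - 1) hf
    set f := pvBsLoop s qq 0 ((s.length : Int) - 1) with hfdef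
    obtain ⟨la, lc, lst, ld⟩ := pvExpandL_spec s qq f
    obtain ⟨ra, rb, rst, rd⟩ := pvExpandR_spec s qq f
    set l := pvExpandL s qq f with hldef
    set r := pvExpandR s qq f with hrdef
    have hl1 : -1 ≤ l := ld (by omega)
    have hrlen : r ≤ (s.length : Int) := rd (by omega)
    have hchar : ∀ (i : Nat) (hi : i < s.length),
        (fun x => PySem.Str.startswith (pvKey x) qq) s[i] = decide ((l + 1).toNat ≤ i ∧ i < r.toNat) := by
      intro i hi
      have hPeq : pvP s qq (i : Int) = PySem.Str.startswith (pvKey s[i]) qq := by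
        rw [pvP, pvKeyAt, PySem.List.pyGetD_eq_getElem s [] (by omega) (by omega)]
        simp
      simp only [← hPeq]
      by_cases hin : l < (i : Int) ∧ (i : Int) < r
      · have htrue : pvP s qq (i : Int) = true := by
          rcases le_or_gt (i : Int) f with hle | hgt
          · exact lc _ hin.1 hle
          · exact rb _ (by omega) hin.2
        rw [htrue]
        symm
        rw [decide_eq_true_iff]
        omega
      · have hfalse : pvP s qq (i : Int) = false := by
          rw [not_and_or, not_lt, not_lt] at hin
          by_contra hx
          have hPi : pvP s qq (i : Int) = true := by
            revert hx; cases pvP s qq (i : Int) <;> simp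
          rcases hin with hle | hge
          · have h0l : (0 : Int) ≤ l := le_trans (by omega) hle
            have hPl : pvP s qq l = true := pvContig hp (by omega) hle la (by omega) hPi hfP
            rcases lst with h | h
            · omega
            · rw [hPl] at h; cases h
          · have hrlt : r < (s.length : Int) := by omega
            have hPr : pvP s qq r = true := pvContig hp (by omega) ra hge (by omega) hfP hPi
            rcases rst with h | h
            · omega
            · rw [hPr] at h; cases h
        rw [hfalse]
        symm
        rw [decide_eq_false_iff_not]
        omega
    have hfil := pvFilterInterval (fun x => PySem.Str.startswith (pvKey x) qq) s (l + 1).toNat r.toNat hchar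
    rw [hfil]
    rw [PySem.List.slice_toNat s (by omega) (by omega)]

-- ===== VERDICT (by name: the statement is the Claim_ definition above) =====
theorem algo_binary_search_spec : Claim_equal_algo_binary_search := by
  intro data q _hDom _hPre
  exact pvMainEq data q
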